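-- pv_equiv track=rewrite | github.com/andrewfiliberti/adventofcode2023 | 12-03-2023/Part1.py | checkSym
-- ===== SOURCE A (Python) =====
-- def checkSym(ind, matrix, symbols):
--     x = int(ind[0])
--     y = int(ind[1])
--     possible = [[x, y-1], [x, y+1], [x-1, y], [x+1, y], [x-1, y-1], [x-1, y+1], [x+1, y-1], [x+1, y+1]]
--     clean = []
--     for p in possible:
--         if p[0] < 0 or p[0] >= len(matrix) or p[1] < 0 or p[1] > len(matrix[0]):
--             continue
--         else:
--             clean.append(p)
--     for i in symbols:
--         if i in clean:
--             return True
--     return False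
-- ===== SOURCE B (Python) =====
-- def checkSym(ind, matrix, symbols):
--     x = int(ind[0])
--     y = int(ind[1])
--     for s in symbols:
--         if len(s) != 2:
--             continue
--         dx = s[0] - x
--         dy = s[1] - y
--         if (-1 <= dx <= 1 and -1 <= dy <= 1 and not (dx == 0 and dy == 0)
--                 and 0 <= s[0] < len(matrix) and 0 <= s[1] <= len(matrix[0])):
--             return True
--     return False
-- ===== Notes on version B (the rewrite author's own statement) =====
-- stated objective: simpler
-- what changed: B drops A's materialized 8-neighbour list and filtered 'clean' list entirely: it iterates over the symbols once and tests adjacency arithmetically (Chebyshev distance 1 plus A's exact bounds guard, including its <= on the row length).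
import Mathlib
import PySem

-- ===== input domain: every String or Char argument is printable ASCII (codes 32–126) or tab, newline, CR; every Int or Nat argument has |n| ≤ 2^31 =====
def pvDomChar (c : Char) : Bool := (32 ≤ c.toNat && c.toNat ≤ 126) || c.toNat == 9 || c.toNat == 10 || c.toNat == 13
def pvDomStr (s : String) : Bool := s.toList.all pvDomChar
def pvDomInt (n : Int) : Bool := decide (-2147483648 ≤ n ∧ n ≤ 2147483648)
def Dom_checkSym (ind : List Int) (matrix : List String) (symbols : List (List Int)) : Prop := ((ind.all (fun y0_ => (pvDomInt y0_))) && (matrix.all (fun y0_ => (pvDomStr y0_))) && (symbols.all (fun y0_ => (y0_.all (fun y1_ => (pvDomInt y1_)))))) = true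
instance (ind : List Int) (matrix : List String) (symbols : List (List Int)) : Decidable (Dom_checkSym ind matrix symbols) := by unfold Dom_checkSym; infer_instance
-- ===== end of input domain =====

-- B replaces A's materialized 8-neighbour list and filtered 'clean' list by a single
-- arithmetic adjacency test per symbol (objective: simpler).


-- ===== PORT A =====
-- the loop's skip test 'p[0] < 0 or p[0] >= len(matrix) or p[1] < 0 or p[1] > len(matrix[0])';
-- len(matrix[0]) is only reached by Python when 0 ≤ p[0] < len(matrix) (short-circuit), so
-- matrix is nonempty there and headD "" (length 0 on []) is exact on every input A returns on.
def pvSkip (M L : Int) (p : List Int) : Bool :=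
  let p0 := (PySem.List.pyGet? p 0).getD 0
  let p1 := (PySem.List.pyGet? p 1).getD 0
  decide (p0 < 0 ∨ M ≤ p0 ∨ p1 < 0 ∨ L < p1)

def checkSym (ind : List Int) (matrix : List String) (symbols : List (List Int)) : Bool :=
  let x := (PySem.List.pyGet? ind 0).getD 0
  let y := (PySem.List.pyGet? ind 1).getD 0
  let possible : List (List Int) :=
    [[x, y-1], [x, y+1], [x-1, y], [x+1, y], [x-1, y-1], [x-1, y+1], [x+1, y-1], [x+1, y+1]]
  let clean := possible.foldl (fun acc p =>
    if pvSkip (matrix.length : Int) ((matrix.headD "").toList.length : Int) p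
    then acc else acc ++ [p]) []
  symbols.any (fun i => clean.contains i)

-- ===== PORT B =====
def checkSym_alt (ind : List Int) (matrix : List String) (symbols : List (List Int)) : Bool :=
  let x := (PySem.List.pyGet? ind 0).getD 0
  let y := (PySem.List.pyGet? ind 1).getD 0
  symbols.any (fun s =>
    s.length == 2 &&
    (let s0 := (PySem.List.pyGet? s 0).getD 0
     let s1 := (PySem.List.pyGet? s 1).getD 0
     let dx := s0 - x
     let dy := s1 - y
     decide (-1 ≤ dx ∧ dx ≤ 1 ∧ -1 ≤ dy ∧ dy ≤ 1 ∧ ¬(dx = 0 ∧ dy = 0) ∧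
             0 ≤ s0 ∧ s0 < (matrix.length : Int) ∧ 0 ≤ s1 ∧
             s1 ≤ ((matrix.headD "").toList.length : Int))))

-- ===== PRECONDITION & SPEC =====
-- A raises IndexError on ind[0]/ind[1] when ind has fewer than two elements; excluded.
def Pre_checkSym (ind : List Int) (matrix : List String) (symbols : List (List Int)) : Prop :=
  2 ≤ ind.length
instance (ind : List Int) (matrix : List String) (symbols : List (List Int)) : Decidable (Pre_checkSym ind matrix symbols) := by unfold Pre_checkSym; infer_instance
def pvWitness_checkSym : List Int × List String × List (List Int) := ([1, 1], ["...", "#.."], [[0, 0]])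

def Spec_checkSym (ind : List Int) (matrix : List String) (symbols : List (List Int)) (out : Bool) : Prop := out = checkSym_alt ind matrix symbols
instance (ind : List Int) (matrix : List String) (symbols : List (List Int)) (out : Bool) : Decidable (Spec_checkSym ind matrix symbols out) := by unfold Spec_checkSym; infer_instance

-- ===== CLAIM (what is proved, stated in full; the proofs are below) =====
def Claim_equal_checkSym : Prop := ∀ (ind : List Int) (matrix : List String) (symbols : List (List Int)), Dom_checkSym ind matrix symbols → Pre_checkSym ind matrix symbols → Spec_checkSym ind matrix symbols (checkSym ind matrix symbols)

-- ===== LEMMAS AND PROOFS =====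

-- A's append-unless-skip loop builds exactly the filter by the negated test
theorem pv_foldl_skip {α : Type} (q : α → Bool) :
    ∀ (l acc : List α),
      l.foldl (fun acc x => if q x then acc else acc ++ [x]) acc
        = acc ++ l.filter (fun x => !q x) := by
  intro l
  induction l with
  | nil => simp
  | cons h t ih =>
    intro acc
    cases hq : q h <;> simp [List.foldl, hq, ih]

-- per-symbol agreement: membership in A's 'clean' list equals B's arithmetic test
theorem pv_mem_clean (x y M L : Int) (s : List Int) :
    (([[x, y-1], [x, y+1], [x-1, y], [x+1, y], [x-1, y-1], [x-1, y+1], [x+1, y-1], [x+1, y+1]].foldl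
        (fun (acc : List (List Int)) p => if pvSkip M L p then acc else acc ++ [p]) []).contains s)
    = (s.length == 2 &&
       (let s0 := (PySem.List.pyGet? s 0).getD 0
        let s1 := (PySem.List.pyGet? s 1).getD 0
        let dx := s0 - x
        let dy := s1 - y
        decide (-1 ≤ dx ∧ dx ≤ 1 ∧ -1 ≤ dy ∧ dy ≤ 1 ∧ ¬(dx = 0 ∧ dy = 0) ∧
                0 ≤ s0 ∧ s0 < M ∧ 0 ≤ s1 ∧ s1 ≤ L))) := by
  rw [pv_foldl_skip (pvSkip M L)]
  match s with
  | [] => simp [pvSkip, PySem.List.pyGet?, PySem.List.pyIdx?]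
  | [a] => simp [pvSkip, PySem.List.pyGet?, PySem.List.pyIdx?]
  | a :: b :: c :: t => simp [pvSkip, PySem.List.pyGet?, PySem.List.pyIdx?]
  | [a, b] =>
    simp only [List.nil_append, List.contains_eq_mem, List.mem_filter, List.mem_cons,
      List.not_mem_nil, or_false, List.cons.injEq, and_true, pvSkip,
      PySem.List.pyGet?, PySem.List.pyIdx?]
    norm_num
    rw [Bool.eq_iff_iff]
    simp only [Bool.and_eq_true, Bool.or_eq_true, Bool.not_eq_true',
      decide_eq_true_eq, decide_eq_false_iff_not]
    omega

-- ===== VERDICT (by name: the statement is the Claim_ definition above) =====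
theorem checkSym_spec : Claim_equal_checkSym := by
  intro ind matrix symbols _ _
  unfold Spec_checkSym checkSym checkSym_alt
  simp only []
  refine List.any_congr rfl ?_
  intro s
  exact pv_mem_clean _ _ _ _ s
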